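-- pv_equiv track=rewrite | github.com/danieljhkim/DataStructures-Algorithms | python/leetcode/favorites/bit/q3513.py | uniqueXorTriplets
-- ===== SOURCE A (Python) =====
-- from typing import List
--
-- def uniqueXorTriplets(nums: List[int]) -> int:
--     n = len(nums)
--     bits = [2**i for i in range(33)]
--     if n <= 2:
--         return n
--     for i in bits:
--         if i > n:
--             return i
-- ===== SOURCE B (Python) =====
-- def uniqueXorTriplets(nums):
--     n = len(nums)
--     if n <= 2:
--         return n
--     return 1 << n.bit_length()
-- ===== Notes on version B (the rewrite author's own statement) =====
-- stated objective: idiomatic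
-- what changed: B replaces A's scan over a precomputed 33-entry list of powers of two with the closed form 1 << n.bit_length(); Pre_ excludes lists of length >= 2**32 (physically unbuildable), on which A's fixed table is exhausted and it falls through returning None instead of an int.
import Mathlib
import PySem

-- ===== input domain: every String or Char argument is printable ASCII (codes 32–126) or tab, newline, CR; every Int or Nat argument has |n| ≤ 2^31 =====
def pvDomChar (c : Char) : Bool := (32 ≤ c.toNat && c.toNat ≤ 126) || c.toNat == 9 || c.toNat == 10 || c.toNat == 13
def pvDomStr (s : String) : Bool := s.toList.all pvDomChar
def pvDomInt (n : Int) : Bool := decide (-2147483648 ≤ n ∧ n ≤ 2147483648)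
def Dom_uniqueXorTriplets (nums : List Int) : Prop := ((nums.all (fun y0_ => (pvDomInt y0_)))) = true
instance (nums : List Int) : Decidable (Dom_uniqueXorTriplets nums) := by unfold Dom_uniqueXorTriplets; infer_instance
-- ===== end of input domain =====

-- B replaces A's scan over a precomputed 33-entry table of powers of two with the
-- closed form 1 << n.bit_length(); equivalence is claimed on lists shorter than 2^32
-- (Pre_), where A's table is not exhausted.

-- ===== PORT A =====
-- the 'for i in bits: if i > n: return i' loop; none = fell off the end (Python returns None)
def pvLoopA (bits : List Int) (n : Int) : Option Int :=
  match bits with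
  | [] => none
  | i :: rest => if i > n then some i else pvLoopA rest n

def uniqueXorTriplets (nums : List Int) : Int :=
  let n : Int := nums.length
  -- bits = [2**i for i in range(33)]; i.toNat is exact since range(33) is nonnegative
  let bits : List Int := (PySem.List.pyRange 0 33 1).map (fun i => (2 : Int) ^ i.toNat)
  if n ≤ 2 then n
  else (pvLoopA bits n).getD 0  -- the none (Python None) case is excluded by Pre_

-- ===== PORT B =====
def uniqueXorTriplets_alt (nums : List Int) : Int :=
  let n : Int := nums.length
  if n ≤ 2 then n
  -- 1 << n.bit_length(); for n ≥ 1, n.bit_length() = Nat.log2 n + 1 (exact here: n ≥ 3)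
  else (2 : Int) ^ (Nat.log2 nums.length + 1)

-- ===== PRECONDITION & SPEC =====
-- Pre_ excludes lists of length ≥ 2^32 (unbuildable in practice): there A's 33-entry
-- table has no entry > n, the loop falls through and Python returns None, not an int.
def Pre_uniqueXorTriplets (nums : List Int) : Prop := nums.length < 4294967296
instance (nums : List Int) : Decidable (Pre_uniqueXorTriplets nums) := by unfold Pre_uniqueXorTriplets; infer_instance
def pvWitness_uniqueXorTriplets : List Int := [1, 2, 3]

def Spec_uniqueXorTriplets (nums : List Int) (out : Int) : Prop := out = uniqueXorTriplets_alt nums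
instance (nums : List Int) (out : Int) : Decidable (Spec_uniqueXorTriplets nums out) := by unfold Spec_uniqueXorTriplets; infer_instance

-- ===== CLAIM (what is proved, stated in full; the proofs are below) =====
def Claim_equal_uniqueXorTriplets : Prop := ∀ (nums : List Int), Dom_uniqueXorTriplets nums → Pre_uniqueXorTriplets nums → Spec_uniqueXorTriplets nums (uniqueXorTriplets nums)

-- ===== LEMMAS AND PROOFS =====

-- The loop over consecutive powers 2^a, …, 2^(a+len-1) returns some (2^k) when k is the
-- least exponent in range with 2^k > n.
lemma pvLoopA_pow_range (len : Nat) : ∀ (a : Nat) (n : Int) (k : Nat),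
    a ≤ k → k < a + len → (2 : Int) ^ k > n → (∀ j, j < k → (2 : Int) ^ j ≤ n) →
    pvLoopA ((List.range' a len).map (fun j => (2 : Int) ^ j)) n = some ((2 : Int) ^ k) := by
  induction len with
  | zero => intro a n k h1 h2; omega
  | succ m ih =>
    intro a n k h1 h2 hgt hle
    simp only [List.range'_succ, List.map_cons, pvLoopA]
    by_cases hak : a = k
    · subst hak; simp [hgt]
    · have ha : (2 : Int) ^ a ≤ n := hle a (by omega)
      have : ¬ ((2 : Int) ^ a > n) := by omega
      simp only [this, if_false]
      exact ih (a + 1) n k (by omega) (by omega) hgt hle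

-- ===== VERDICT (by name: the statement is the Claim_ definition above) =====
theorem uniqueXorTriplets_spec : Claim_equal_uniqueXorTriplets := by
  intro nums _ hpre
  unfold Spec_uniqueXorTriplets uniqueXorTriplets uniqueXorTriplets_alt
  simp only []
  by_cases h2 : (nums.length : Int) ≤ 2
  · simp [h2]
  · have hm3 : 3 ≤ nums.length := by omega
    have hm0 : nums.length ≠ 0 := by omega
    have hmlt : nums.length < 2 ^ 32 := hpre
    simp only [if_neg h2]
    have hbits : (PySem.List.pyRange 0 33 1).map (fun i => (2 : Int) ^ i.toNat)
        = (List.range' 0 33).map (fun j => (2 : Int) ^ j) := by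
      rw [PySem.List.pyRange_one]
      simp [List.range_eq_range', List.map_map, Function.comp]
    rw [hbits]
    set k := Nat.log2 nums.length + 1 with hk
    have hklt : k < 33 := by
      have := Nat.log2_lt hm0 |>.mpr hmlt
      omega
    have hgt : (2 : Int) ^ k > (nums.length : Int) := by
      have := Nat.lt_log2_self (n := nums.length)
      exact_mod_cast this
    have hle : ∀ j, j < k → (2 : Int) ^ j ≤ (nums.length : Int) := by
      intro j hj
      have h1 : 2 ^ j ≤ 2 ^ Nat.log2 nums.length := Nat.pow_le_pow_right (by omega) (by omega)
      have h2 : 2 ^ Nat.log2 nums.length ≤ nums.length := Nat.log2_self_le hm0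
      exact_mod_cast Nat.le_trans h1 h2
    rw [pvLoopA_pow_range 33 0 (nums.length : Int) k (by omega) (by omega) hgt hle]
    rfl
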